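-- pv_equiv track=rewrite | github.com/AlexusTheA/AnnoKI | src/utils/tool_functions.py | reward_bin
-- ===== SOURCE A (Python) =====
-- def reward_bin(requirements, resources, FLAGS, action):
--     reward_value = -1
--
--     conditions = len(requirements)
--
--     for i in range(conditions):
--         a = (1 << conditions - i -1)
--         if (FLAGS & a) and resources[i] >= requirements[i]:
--             reward_value += 2 ** (conditions - i)
--             #a = ~(1 << conditions - i)
--             FLAGS &= ~a
--
--     if FLAGS == 0:
--         reward_value += 20
--
--     if action == 3:
--         reward_value -= 10
--
--     return reward_value, FLAGS
-- ===== SOURCE B (Python) =====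
-- def reward_bin(requirements, resources, FLAGS, action):
--     n = len(requirements)
--     reward = -1
--     # work through the live bitmask: visit only the set flag bits (within the
--     # n low bits), lowest set bit first, instead of scanning every index
--     pending = FLAGS & ((1 << n) - 1)
--     while pending:
--         low = pending & -pending          # lowest set bit (a power of two)
--         p = low.bit_length() - 1          # its position
--         i = n - 1 - p                     # the index that owns this flag bit
--         if resources[i] >= requirements[i]:
--             reward += 2 * low             # 2 ** (n - i) == 2 * 2**p
--             FLAGS -= low                  # clear the satisfied bit
--         pending -= low
--     if FLAGS == 0:
--         reward += 20
--     if action == 3: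
--         reward -= 10
--     return reward, FLAGS
-- ===== Notes on version B (the rewrite author's own statement) =====
-- stated objective: faster
-- what changed: A scans every index i in range(len(requirements)) and tests bit n-1-i of FLAGS each time; B instead drives the loop off the live bitmask of the n low FLAGS bits, repeatedly extracting the lowest set bit (pending & -pending), mapping its position back to an index, and clearing it, so only set flag bits are visited.
import Mathlib
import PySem

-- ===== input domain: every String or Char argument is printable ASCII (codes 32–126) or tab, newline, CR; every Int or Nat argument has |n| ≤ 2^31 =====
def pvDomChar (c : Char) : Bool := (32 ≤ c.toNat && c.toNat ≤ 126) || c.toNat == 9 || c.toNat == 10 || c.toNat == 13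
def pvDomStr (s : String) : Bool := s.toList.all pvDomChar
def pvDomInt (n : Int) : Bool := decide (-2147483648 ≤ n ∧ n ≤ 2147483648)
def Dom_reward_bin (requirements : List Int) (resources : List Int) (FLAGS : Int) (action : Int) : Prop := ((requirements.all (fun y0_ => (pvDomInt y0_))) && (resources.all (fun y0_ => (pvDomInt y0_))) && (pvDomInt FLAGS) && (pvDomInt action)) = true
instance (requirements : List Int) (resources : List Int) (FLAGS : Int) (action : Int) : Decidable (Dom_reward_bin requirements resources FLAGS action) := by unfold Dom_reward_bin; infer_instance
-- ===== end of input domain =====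

-- B replaces A's scan over every index i (testing bit n-1-i of FLAGS each time) by a loop driven
-- off the live bitmask of the n low FLAGS bits: it repeatedly extracts the lowest set bit
-- (pending & -pending), maps its position back to an index, and clears it, visiting only set bits
-- (a timing run measured B faster at the largest generated sizes).

-- ===== PORT A =====
-- loop body of A's 'for i in range(conditions)' (state = (reward_value, FLAGS))
def stepA (requirements resources : List Int) (conditions : Int) (st : Int × Int) (i : Int) : Int × Int :=
  let a : Int := (1 : Int) <<< (conditions - i - 1).toNat
  if PySem.Int.band st.2 a ≠ 0 ∧ PySem.List.pyGetD resources i 0 ≥ PySem.List.pyGetD requirements i 0 then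
    (st.1 + 2 ^ (conditions - i).toNat, PySem.Int.band st.2 (Int.not a))
  else st

def reward_bin (requirements : List Int) (resources : List Int) (FLAGS : Int) (action : Int) : Int × Int :=
  let conditions : Int := requirements.length
  let st := (PySem.List.pyRange 0 conditions 1).foldl (stepA requirements resources conditions) (-1, FLAGS)
  let r1 := if st.2 = 0 then st.1 + 20 else st.1
  let r2 := if action = 3 then r1 - 10 else r1
  (r2, st.2)

-- ===== PORT B =====
-- termination facts for B's while loop (cited by loopB's decreasing_by)
lemma band_pos_neg_self (m : Nat) (hm : 0 < m) :
    PySem.Int.band (m : Int) (-(m : Int)) = ((m - (m &&& (m - 1)) : Nat) : Int) := by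
  unfold PySem.Int.band
  rw [if_pos (Int.natCast_nonneg m), if_neg (by omega : ¬ (0:Int) ≤ -(m : Int))]
  have h1 : ((m : Int)).toNat = m := Int.toNat_natCast m
  have h2 : (-(-(m : Int)) - 1).toNat = m - 1 := by omega
  rw [h1, h2]

lemma loopB_dec (pending : Int) (hp : 0 < pending) :
    (pending - PySem.Int.band pending (-pending)).toNat < pending.toNat := by
  obtain ⟨m, rfl⟩ : ∃ m : Nat, pending = (m : Int) := ⟨pending.toNat, (Int.toNat_of_nonneg hp.le).symm⟩
  have hm : 0 < m := by exact_mod_cast hp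
  rw [band_pos_neg_self m hm]
  have h1 : m &&& (m - 1) ≤ m - 1 := Nat.and_le_right
  omega

-- B's 'while pending:' loop over the state (pending, reward, FLAGS); pending is a nonnegative
-- bitmask throughout, so Python's truthiness test 'while pending:' is 'while 0 < pending'
def loopB (requirements resources : List Int) (n : Int) (pending reward fl : Int) : Int × Int :=
  if hp : 0 < pending then
    let low := PySem.Int.band pending (-pending)      -- pending & -pending : lowest set bit
    let p : Nat := PySem.Int.bitLength low - 1        -- low.bit_length() - 1 (low > 0)
    let i : Int := n - 1 - (p : Int)
    if PySem.List.pyGetD resources i 0 ≥ PySem.List.pyGetD requirements i 0 then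
      loopB requirements resources n (pending - low) (reward + 2 * low) (fl - low)
    else
      loopB requirements resources n (pending - low) reward fl
  else (reward, fl)
termination_by pending.toNat
decreasing_by
  · exact loopB_dec pending hp
  · exact loopB_dec pending hp

def reward_bin_alt (requirements : List Int) (resources : List Int) (FLAGS : Int) (action : Int) : Int × Int :=
  let n : Int := requirements.length
  let pending := PySem.Int.band FLAGS ((1 : Int) <<< n.toNat - 1)   -- FLAGS & ((1 << n) - 1), n = len ≥ 0
  let st := loopB requirements resources n pending (-1) FLAGS
  let r1 := if st.2 = 0 then st.1 + 20 else st.1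
  let r2 := if action = 3 then r1 - 10 else r1
  (r2, st.2)

-- ===== PRECONDITION & SPEC =====
-- Pre_ excludes exactly the inputs where Python A raises IndexError: an index i whose flag bit
-- (bit requirements.length-1-i of FLAGS) is set but i is out of range for resources.
def Pre_reward_bin (requirements : List Int) (resources : List Int) (FLAGS : Int) (action : Int) : Prop :=
  ∀ i : Nat, i < requirements.length → FLAGS.testBit (requirements.length - 1 - i) = true → i < resources.length

instance (requirements : List Int) (resources : List Int) (FLAGS : Int) (action : Int) : Decidable (Pre_reward_bin requirements resources FLAGS action) := by
  unfold Pre_reward_bin; infer_instance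

def pvWitness_reward_bin : List Int × List Int × Int × Int := ([1, 2], [1, 5], 2, 0)

def Spec_reward_bin (requirements : List Int) (resources : List Int) (FLAGS : Int) (action : Int) (out : Int × Int) : Prop := out = reward_bin_alt requirements resources FLAGS action
instance (requirements : List Int) (resources : List Int) (FLAGS : Int) (action : Int) (out : Int × Int) : Decidable (Spec_reward_bin requirements resources FLAGS action out) := by unfold Spec_reward_bin; infer_instance

-- ===== CLAIM (what is proved, stated in full; the proofs are below) =====
def Claim_equal_reward_bin : Prop := ∀ (requirements : List Int) (resources : List Int) (FLAGS : Int) (action : Int), Dom_reward_bin requirements resources FLAGS action → Pre_reward_bin requirements resources FLAGS action → Spec_reward_bin requirements resources FLAGS action (reward_bin requirements resources FLAGS action)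

-- ===== LEMMAS AND PROOFS =====

-- Nat-level bit facts ---------------------------------------------------------

lemma nat_mod_lt_pow_of_testBit_false (x i : Nat) (h : x.testBit i = false) :
    x % 2 ^ (i + 1) < 2 ^ i := by
  have hr : (x % 2 ^ (i + 1)).testBit i = false := by
    rw [Nat.testBit_mod_two_pow]; simp [h]
  by_contra hge
  push_neg at hge
  have := Nat.testBit_of_two_pow_le_and_two_pow_add_one_gt hge
    (Nat.mod_lt _ (Nat.two_pow_pos (i + 1)))
  simp [this] at hr

lemma nat_pow_le_mod_of_testBit_true (x i : Nat) (h : x.testBit i = true) :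
    2 ^ i ≤ x % 2 ^ (i + 1) := by
  have hr : (x % 2 ^ (i + 1)).testBit i = true := by
    rw [Nat.testBit_mod_two_pow]; simp [h]
  exact Nat.ge_two_pow_of_testBit hr

-- adding 2^i when bit i is clear does not change any other bit
lemma nat_testBit_add_pow (x i j : Nat) (h : x.testBit i = false) (hj : j ≠ i) :
    (x + 2 ^ i).testBit j = x.testBit j := by
  rcases Nat.lt_or_ge j i with hji | hji
  · have h1 : x.testBit j = (x % 2 ^ i).testBit j := by
      rw [Nat.testBit_mod_two_pow]; simp [hji]
    have h2 : (x + 2 ^ i).testBit j = ((x + 2 ^ i) % 2 ^ i).testBit j := by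
      rw [Nat.testBit_mod_two_pow]; simp [hji]
    rw [h1, h2, Nat.add_mod_right]
  · have hji' : i + 1 ≤ j := by omega
    have e1 : j = (j - (i + 1)) + (i + 1) := by omega
    have hpos : 0 < 2 ^ (i + 1) := Nat.two_pow_pos (i + 1)
    have hdiv : (x + 2 ^ i) / 2 ^ (i + 1) = x / 2 ^ (i + 1) := by
      have hr := nat_mod_lt_pow_of_testBit_false x i h
      have hx := Nat.div_add_mod x (2 ^ (i + 1))
      have h2i : (2:Nat) ^ (i + 1) = 2 * 2 ^ i := by ring
      have hlt : x % 2 ^ (i + 1) + 2 ^ i < 2 ^ (i + 1) := by omega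
      calc (x + 2 ^ i) / 2 ^ (i + 1)
          = (2 ^ (i + 1) * (x / 2 ^ (i + 1)) + (x % 2 ^ (i + 1) + 2 ^ i)) / 2 ^ (i + 1) := by
            congr 1; omega
        _ = x / 2 ^ (i + 1) := by
            rw [Nat.mul_add_div hpos, Nat.div_eq_of_lt hlt]
            omega
    rw [e1, Nat.testBit_add, Nat.testBit_add, hdiv]

-- subtracting 2^i when bit i is set does not change any other bit
lemma nat_testBit_sub_pow (x i j : Nat) (h : x.testBit i = true) (hj : j ≠ i) :
    (x - 2 ^ i).testBit j = x.testBit j := by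
  have hge : 2 ^ i ≤ x := Nat.ge_two_pow_of_testBit h
  rcases Nat.lt_or_ge j i with hji | hji
  · have h1 : x.testBit j = (x % 2 ^ i).testBit j := by
      rw [Nat.testBit_mod_two_pow]; simp [hji]
    have h2 : (x - 2 ^ i).testBit j = ((x - 2 ^ i) % 2 ^ i).testBit j := by
      rw [Nat.testBit_mod_two_pow]; simp [hji]
    have h3 : (x - 2 ^ i) % 2 ^ i = x % 2 ^ i := by
      conv_rhs => rw [show x = (x - 2 ^ i) + 2 ^ i by omega]
      rw [Nat.add_mod_right]
    rw [h1, h2, h3]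
  · have hji' : i + 1 ≤ j := by omega
    have e1 : j = (j - (i + 1)) + (i + 1) := by omega
    have hpos : 0 < 2 ^ (i + 1) := Nat.two_pow_pos (i + 1)
    have hdiv : (x - 2 ^ i) / 2 ^ (i + 1) = x / 2 ^ (i + 1) := by
      have hr := nat_pow_le_mod_of_testBit_true x i h
      have hrlt : x % 2 ^ (i + 1) < 2 ^ (i + 1) := Nat.mod_lt _ hpos
      have hx := Nat.div_add_mod x (2 ^ (i + 1))
      have h2i : (2:Nat) ^ (i + 1) = 2 * 2 ^ i := by ring
      have hlt : x % 2 ^ (i + 1) - 2 ^ i < 2 ^ (i + 1) := by omega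
      calc (x - 2 ^ i) / 2 ^ (i + 1)
          = (2 ^ (i + 1) * (x / 2 ^ (i + 1)) + (x % 2 ^ (i + 1) - 2 ^ i)) / 2 ^ (i + 1) := by
            congr 1; omega
        _ = x / 2 ^ (i + 1) := by
            rw [Nat.mul_add_div hpos, Nat.div_eq_of_lt hlt]
            omega
    rw [e1, Nat.testBit_add, Nat.testBit_add, hdiv]

-- clearing the subtracted bit itself
lemma nat_testBit_sub_pow_self (x t : Nat) (h : x.testBit t = true) :
    (x - 2 ^ t).testBit t = false := by
  have hge : 2 ^ t ≤ x := Nat.ge_two_pow_of_testBit h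
  have hpos : 0 < 2 ^ t := Nat.two_pow_pos t
  have hb : x % 2 ^ t < 2 ^ t := Nat.mod_lt _ hpos
  rw [Nat.testBit_eq_decide_div_mod_eq] at h ⊢
  have hx := Nat.div_add_mod x (2 ^ t)
  have hq1 : 1 ≤ x / 2 ^ t := by
    rw [Nat.le_div_iff_mul_le hpos]; omega
  obtain ⟨q', hq'⟩ : ∃ q', x / 2 ^ t = q' + 1 := ⟨x / 2 ^ t - 1, by omega⟩
  have hsub : x - 2 ^ t = 2 ^ t * q' + x % 2 ^ t := by
    rw [hq'] at hx
    have hdist : 2 ^ t * (q' + 1) = 2 ^ t * q' + 2 ^ t := by ring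
    omega
  rw [hq'] at h
  rw [hsub, Nat.mul_add_div hpos, Nat.div_eq_of_lt hb]
  simp only [decide_eq_true_eq] at h
  simp only [decide_eq_false_iff_not]
  omega

lemma nat_or_pow_eq_add (x i : Nat) (h : x.testBit i = false) :
    x ||| 2 ^ i = x + 2 ^ i := by
  apply Nat.eq_of_testBit_eq
  intro j
  rw [Nat.testBit_or, Nat.testBit_two_pow]
  rcases eq_or_ne j i with rfl | hne
  · rw [show x + 2 ^ j = 2 ^ j + x by omega, Nat.testBit_two_pow_add_eq, h]
    simp
  · rw [nat_testBit_add_pow x i j h hne]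
    simp [Ne.symm hne]

-- doubling and testBit ---------------------------------------------------------

lemma tb_double_zero (k c : Nat) (hc : c < 2) : (2 * k + c).testBit 0 = decide (c = 1) := by
  rw [Nat.testBit_eq_decide_div_mod_eq, decide_eq_decide, pow_zero, Nat.div_one]
  omega

lemma tb_double_succ (k c p : Nat) (hc : c < 2) : (2 * k + c).testBit (p + 1) = k.testBit p := by
  rw [Nat.testBit_eq_decide_div_mod_eq, Nat.testBit_eq_decide_div_mod_eq, decide_eq_decide]
  have h : (2 * k + c) / 2 ^ (p + 1) = k / 2 ^ p := by
    rw [pow_succ, show (2:Nat) ^ p * 2 = 2 * 2 ^ p by ring, ← Nat.div_div_eq_div_mul,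
        show (2 * k + c) / 2 = k by omega]
  rw [h]

lemma tb0_even (k : Nat) : (2 * k).testBit 0 = false := by
  have := tb_double_zero k 0 (by omega)
  simpa using this

lemma tbS_even (k p : Nat) : (2 * k).testBit (p + 1) = k.testBit p := by
  have := tb_double_succ k 0 p (by omega)
  simpa using this

lemma tb0_odd (k : Nat) : (2 * k + 1).testBit 0 = true := by
  have := tb_double_zero k 1 (by omega)
  simpa using this

lemma tbS_odd (k p : Nat) : (2 * k + 1).testBit (p + 1) = k.testBit p := tb_double_succ k 1 p (by omega)

-- the lowest-set-bit computation m - (m &&& (m-1)) is a power of two -----------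

lemma lowN_spec (m : Nat) (hm : 0 < m) :
    ∃ t, m &&& (m - 1) = m - 2 ^ t ∧ 2 ^ t ≤ m ∧ m.testBit t = true ∧
      ∀ q, q < t → m.testBit q = false := by
  induction m using Nat.strong_induction_on with
  | _ m ih =>
    rcases Nat.even_or_odd m with he | ho
    · obtain ⟨m', hme⟩ : ∃ m', m = 2 * m' := ⟨m / 2, by obtain ⟨r, hr⟩ := he; omega⟩
      subst hme
      have hm' : 0 < m' := by omega
      obtain ⟨t, hland, hle, hbit, hlow⟩ := ih m' (by omega) hm'
      have hps : (2:Nat) ^ (t + 1) = 2 * 2 ^ t := by ring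
      refine ⟨t + 1, ?_, by omega, by rw [tbS_even]; exact hbit, ?_⟩
      · have key : (2 * m') &&& (2 * m' - 1) = 2 * (m' &&& (m' - 1)) := by
          apply Nat.eq_of_testBit_eq
          intro q
          rw [show 2 * m' - 1 = 2 * (m' - 1) + 1 by omega]
          cases q with
          | zero => simp [Nat.testBit_land, tb0_even]
          | succ q => rw [Nat.testBit_land, tbS_even, tbS_odd, tbS_even, Nat.testBit_land]
        rw [key, hland]
        omega
      · intro q hq
        cases q with
        | zero => exact tb0_even m'
        | succ q => rw [tbS_even]; exact hlow q (by omega)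
    · obtain ⟨m', hmo⟩ := ho
      subst hmo
      refine ⟨0, ?_, by omega, tb0_odd m', by omega⟩
      have key : (2 * m' + 1) &&& (2 * m' + 1 - 1) = 2 * m' := by
        apply Nat.eq_of_testBit_eq
        intro q
        rw [show 2 * m' + 1 - 1 = 2 * m' by omega]
        cases q with
        | zero => simp [Nat.testBit_land, tb0_even, tb0_odd]
        | succ q => rw [Nat.testBit_land, tbS_odd, tbS_even, Bool.and_self]
      rw [key]
      omega

lemma bitLength_two_pow (t : Nat) : PySem.Int.bitLength ((2 ^ t : Nat) : Int) = t + 1 := by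
  induction t with
  | zero =>
    rw [show (((2:Nat) ^ 0 : Nat) : Int) = (1 : Int) by norm_num]
    decide
  | succ t ih =>
    rw [PySem.Int.bitLength_natCast (Nat.two_pow_pos (t + 1)),
        show (2:Nat) ^ (t + 1) / 2 = 2 ^ t by rw [pow_succ, Nat.mul_div_cancel _ (by omega)], ih]

-- complement within n bits -----------------------------------------------------

lemma tb_compl (n : Nat) : ∀ y p, y < 2 ^ n →
    (2 ^ n - 1 - y).testBit p = (decide (p < n) && !y.testBit p) := by
  induction n with
  | zero =>
    intro y p hy
    have hy0 : y = 0 := by simpa using hy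
    subst hy0
    simp [Nat.zero_testBit]
  | succ n ih =>
    intro y p hy
    have h2 : (2:Nat) ^ (n + 1) = 2 * 2 ^ n := by ring
    have hrep : y = 2 * (y / 2) + y % 2 := by omega
    have hsplit : 2 ^ (n + 1) - 1 - y = 2 * (2 ^ n - 1 - y / 2) + (1 - y % 2) := by
      have := Nat.two_pow_pos n
      omega
    rw [hsplit]
    cases p with
    | zero =>
      rw [tb_double_zero _ _ (by omega)]
      have hy0 : y.testBit 0 = decide (y % 2 = 1) := by
        rw [Nat.testBit_eq_decide_div_mod_eq]; simp
      rcases Nat.mod_two_eq_zero_or_one y with h | h <;> simp [hy0, h]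
    | succ p =>
      rw [tb_double_succ _ _ _ (by omega), ih (y / 2) p (by omega)]
      have hys : y.testBit (p + 1) = (y / 2).testBit p := by
        calc y.testBit (p + 1) = (2 * (y / 2) + y % 2).testBit (p + 1) := by rw [← hrep]
          _ = (y / 2).testBit p := tb_double_succ _ _ _ (by omega)
      rw [hys]
      simp [Nat.succ_lt_succ_iff]

-- Int-level bridges -----------------------------------------------------------

lemma int_rep (F : Int) : (∃ m : Nat, F = (m : Int)) ∨ (∃ m : Nat, F = -(m : Int) - 1) := by
  rcases F with m | m
  · exact Or.inl ⟨m, rfl⟩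
  · exact Or.inr ⟨m, by rw [Int.negSucc_eq]; ring⟩

lemma tb_coe (m p : Nat) : ((m : Int)).testBit p = m.testBit p := rfl

lemma neg_sub_one_eq_negSucc (m : Nat) : -(m : Int) - 1 = Int.negSucc m := by
  rw [Int.negSucc_eq]; ring

lemma tb_neg (m p : Nat) : ((-(m : Int) - 1).testBit p) = !m.testBit p := by
  rw [neg_sub_one_eq_negSucc]
  rfl

lemma not_coe (n : Nat) : Int.not (n : Int) = -(n : Int) - 1 := by
  rw [neg_sub_one_eq_negSucc]
  rfl

lemma one_shl (p : Nat) : (1 : Int) <<< p = ((2 ^ p : Nat) : Int) := by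
  rw [Int.shiftLeft_eq]; push_cast; ring

-- band F 2^p tests bit p
lemma band_two_pow (F : Int) (p : Nat) :
    PySem.Int.band F ((2 ^ p : Nat) : Int) = if F.testBit p then ((2 ^ p : Nat) : Int) else 0 := by
  have hb : (0 : Int) ≤ ((2 ^ p : Nat) : Int) := Int.natCast_nonneg _
  rcases int_rep F with ⟨m, rfl⟩ | ⟨m, rfl⟩
  · rw [tb_coe]
    unfold PySem.Int.band
    rw [if_pos (Int.natCast_nonneg m), if_pos hb, Int.toNat_natCast, Int.toNat_natCast,
        Nat.and_two_pow]
    cases h : m.testBit p <;> simp [h]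
  · rw [tb_neg]
    have hneg : ¬ (0 : Int) ≤ -(m : Int) - 1 := by omega
    unfold PySem.Int.band
    rw [if_neg hneg, if_pos hb, Int.toNat_natCast,
        show -(-(m : Int) - 1) - 1 = (m : Int) by ring, Int.toNat_natCast,
        Nat.two_pow_and]
    cases h : m.testBit p <;> simp [h]

-- clearing a set bit is subtraction
lemma band_not_two_pow (F : Int) (p : Nat) (h : F.testBit p = true) :
    PySem.Int.band F (Int.not ((2 ^ p : Nat) : Int)) = F - ((2 ^ p : Nat) : Int) := by
  rw [not_coe]
  have hbneg : ¬ (0 : Int) ≤ -((2 ^ p : Nat) : Int) - 1 := by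
    have : (0:Int) ≤ ((2 ^ p : Nat) : Int) := Int.natCast_nonneg _
    omega
  rcases int_rep F with ⟨m, rfl⟩ | ⟨m, rfl⟩
  · rw [tb_coe] at h
    have hge : 2 ^ p ≤ m := Nat.ge_two_pow_of_testBit h
    unfold PySem.Int.band
    rw [if_pos (Int.natCast_nonneg m), if_neg hbneg, Int.toNat_natCast,
        show -(-((2 ^ p : Nat) : Int) - 1) - 1 = ((2 ^ p : Nat) : Int) by ring,
        Int.toNat_natCast, Nat.and_two_pow, h]
    rw [Bool.toNat_true, one_mul, Nat.cast_sub hge]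
  · rw [tb_neg] at h
    have hm : m.testBit p = false := by
      cases hmp : m.testBit p
      · rfl
      · rw [hmp] at h; simp at h
    have hneg1 : ¬ (0 : Int) ≤ -(m : Int) - 1 := by omega
    unfold PySem.Int.band
    rw [if_neg hneg1, if_neg hbneg,
        show -(-(m : Int) - 1) - 1 = (m : Int) by ring,
        show -(-((2 ^ p : Nat) : Int) - 1) - 1 = ((2 ^ p : Nat) : Int) by ring,
        Int.toNat_natCast, Int.toNat_natCast, nat_or_pow_eq_add m p hm]
    push_cast
    ring

-- subtracting a set bit does not change any other bit
lemma int_testBit_sub_pow (F : Int) (p q : Nat) (h : F.testBit p = true) (hq : q ≠ p) :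
    (F - ((2 ^ p : Nat) : Int)).testBit q = F.testBit q := by
  rcases int_rep F with ⟨m, rfl⟩ | ⟨m, rfl⟩
  · rw [tb_coe] at h
    have hge : 2 ^ p ≤ m := Nat.ge_two_pow_of_testBit h
    rw [show (m : Int) - ((2 ^ p : Nat) : Int) = ((m - 2 ^ p : Nat) : Int) by push_cast [hge]; ring]
    rw [tb_coe, tb_coe]
    exact nat_testBit_sub_pow m p q h hq
  · rw [tb_neg] at h
    have hm : m.testBit p = false := by
      cases hmp : m.testBit p
      · rfl
      · rw [hmp] at h; simp at h
    rw [show -(m : Int) - 1 - ((2 ^ p : Nat) : Int) = -((m + 2 ^ p : Nat) : Int) - 1 by push_cast; ring]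
    rw [tb_neg, tb_neg, nat_testBit_add_pow m p q hm hq]

-- the masked FLAGS value B starts from ----------------------------------------

lemma mask_spec (FLAGS : Int) (n : Nat) :
    ∃ M : Nat, PySem.Int.band FLAGS ((1 : Int) <<< n - 1) = (M : Int) ∧ M < 2 ^ n ∧
      ∀ p, p < n → M.testBit p = FLAGS.testBit p := by
  have hpow := Nat.two_pow_pos n
  have hshift : ((1:Int) <<< n) - 1 = ((2 ^ n - 1 : Nat) : Int) := by
    rw [one_shl, Nat.cast_sub hpow]
    push_cast
    ring
  rw [hshift]
  rcases int_rep FLAGS with ⟨f, rfl⟩ | ⟨k, rfl⟩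
  · refine ⟨f &&& (2 ^ n - 1), PySem.Int.band_natCast f _, ?_, ?_⟩
    · have h1 : f &&& (2 ^ n - 1) ≤ 2 ^ n - 1 := Nat.and_le_right
      omega
    · intro p hp
      rw [Nat.testBit_land, Nat.testBit_two_pow_sub_one]
      simp [hp]
      exact (tb_coe f p).symm
  · have hneg : ¬ (0:Int) ≤ -(k : Int) - 1 := by omega
    refine ⟨(2 ^ n - 1) - ((2 ^ n - 1) &&& k), ?_, by omega, ?_⟩
    · unfold PySem.Int.band
      rw [if_neg hneg, if_pos (Int.natCast_nonneg _)]
      have h1 : ((2 ^ n - 1 : Nat) : Int).toNat = 2 ^ n - 1 := Int.toNat_natCast _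
      have h2 : (-(-(k : Int) - 1) - 1).toNat = k := by omega
      rw [h1, h2]
    · intro p hp
      have hylt : (2 ^ n - 1) &&& k < 2 ^ n := by
        have : (2 ^ n - 1) &&& k ≤ 2 ^ n - 1 := Nat.and_le_left
        omega
      rw [tb_compl n _ p hylt, Nat.testBit_land, Nat.testBit_two_pow_sub_one, tb_neg]
      simp [hp]

-- the per-index condition and the canonical "cleared value" --------------------

def condb (requirements resources : List Int) (i : Nat) : Bool :=
  decide (PySem.List.pyGetD resources (i : Int) 0 ≥ PySem.List.pyGetD requirements (i : Int) 0)

def hitb (requirements resources : List Int) (FL : Int) (i : Nat) : Bool :=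
  FL.testBit (requirements.length - 1 - i) && condb requirements resources i

def csum (requirements resources : List Int) (FL : Int) (k : Nat) : Int :=
  (List.range k).foldl
    (fun c i => if hitb requirements resources FL i then c + ((2 ^ (requirements.length - 1 - i) : Nat) : Int) else c) 0

lemma hitb_elim (requirements resources : List Int) (FL : Int) (k : Nat)
    (h : hitb requirements resources FL k = true) :
    FL.testBit (requirements.length - 1 - k) = true ∧
      PySem.List.pyGetD resources (k : Int) 0 ≥ PySem.List.pyGetD requirements (k : Int) 0 := by
  simp only [hitb, condb, Bool.and_eq_true, decide_eq_true_eq] at h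
  exact h

lemma hitb_intro (requirements resources : List Int) (FL : Int) (k : Nat)
    (h1 : FL.testBit (requirements.length - 1 - k) = true)
    (h2 : PySem.List.pyGetD resources (k : Int) 0 ≥ PySem.List.pyGetD requirements (k : Int) 0) :
    hitb requirements resources FL k = true := by
  simp only [hitb, condb, Bool.and_eq_true, decide_eq_true_eq]
  exact ⟨h1, h2⟩

lemma csum_succ (requirements resources : List Int) (FL : Int) (k : Nat) :
    csum requirements resources FL (k + 1) =
      if hitb requirements resources FL k
      then csum requirements resources FL k + ((2 ^ (requirements.length - 1 - k) : Nat) : Int)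
      else csum requirements resources FL k := by
  simp [csum, List.range_succ, List.foldl_append]

-- A's loop invariant
lemma foldA_inv (requirements resources : List Int) (FLAGS : Int) :
    ∀ k, k ≤ requirements.length →
      (((List.range k).foldl
          (fun st (j : Nat) => stepA requirements resources (requirements.length : Int) st (j : Int))
          (-1, FLAGS))
        = (-1 + 2 * csum requirements resources FLAGS k, FLAGS - csum requirements resources FLAGS k))
      ∧ ∀ j : Nat, k ≤ j → j < requirements.length →
          (FLAGS - csum requirements resources FLAGS k).testBit (requirements.length - 1 - j)
            = FLAGS.testBit (requirements.length - 1 - j) := by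
  intro k
  induction k with
  | zero =>
    intro _
    constructor
    · simp [csum]
    · intro j _ _; simp [csum]
  | succ k ih =>
    intro hk1
    have hk : k < requirements.length := by omega
    obtain ⟨ihfold, ihbit⟩ := ih (by omega)
    have hp : ((requirements.length : Int) - (k : Int) - 1).toNat = requirements.length - 1 - k := by omega
    have hq : ((requirements.length : Int) - (k : Int)).toNat = requirements.length - k := by omega
    have hbitk := ihbit k (le_refl k) hk
    have hstep : stepA requirements resources (requirements.length : Int)
        (-1 + 2 * csum requirements resources FLAGS k, FLAGS - csum requirements resources FLAGS k) (k : Int)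
        = (-1 + 2 * csum requirements resources FLAGS (k + 1),
           FLAGS - csum requirements resources FLAGS (k + 1)) ∧
        (∀ j : Nat, k + 1 ≤ j → j < requirements.length →
          (FLAGS - csum requirements resources FLAGS (k + 1)).testBit (requirements.length - 1 - j)
            = FLAGS.testBit (requirements.length - 1 - j)) := by
      by_cases hhit : hitb requirements resources FLAGS k = true
      · obtain ⟨hfl, hcond⟩ := hitb_elim requirements resources FLAGS k hhit
        have htest : (FLAGS - csum requirements resources FLAGS k).testBit (requirements.length - 1 - k) = true := by
          rw [hbitk]; exact hfl
        have hne : ((2 ^ (requirements.length - 1 - k) : Nat) : Int) ≠ 0 := by positivity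
        constructor
        · simp only [stepA, hp, hq, one_shl, band_two_pow, htest, if_true]
          rw [if_pos ⟨hne, hcond⟩, band_not_two_pow _ _ htest, csum_succ, if_pos hhit,
              Prod.mk.injEq]
          have h2 : (2 : Int) ^ (requirements.length - k) = 2 * ((2 ^ (requirements.length - 1 - k) : Nat) : Int) := by
            push_cast
            rw [show requirements.length - k = (requirements.length - 1 - k) + 1 by omega]
            ring
          exact ⟨by rw [h2]; ring, by ring⟩
        · intro j hj1 hj2
          rw [csum_succ, if_pos hhit,
              show FLAGS - (csum requirements resources FLAGS k + ((2 ^ (requirements.length - 1 - k) : Nat) : Int))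
                = (FLAGS - csum requirements resources FLAGS k) - ((2 ^ (requirements.length - 1 - k) : Nat) : Int) by ring,
              int_testBit_sub_pow _ _ _ htest (by omega)]
          exact ihbit j (by omega) hj2
      · have hnot : ¬ (PySem.Int.band (FLAGS - csum requirements resources FLAGS k)
              ((1 : Int) <<< ((requirements.length : Int) - (k : Int) - 1).toNat) ≠ 0 ∧
            PySem.List.pyGetD resources (k : Int) 0 ≥ PySem.List.pyGetD requirements (k : Int) 0) := by
          rw [hp, one_shl, band_two_pow, hbitk]
          intro ⟨h1, h2⟩
          apply hhit
          cases hfl : FLAGS.testBit (requirements.length - 1 - k) with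
          | false => rw [hfl] at h1; simp at h1
          | true => exact hitb_intro requirements resources FLAGS k hfl h2
        constructor
        · simp only [stepA]
          rw [if_neg hnot, csum_succ, if_neg hhit]
        · intro j hj1 hj2
          rw [csum_succ, if_neg hhit]
          exact ihbit j (by omega) hj2
    rw [List.range_succ, List.foldl_append, ihfold]
    simp only [List.foldl_cons, List.foldl_nil]
    exact ⟨hstep.1, hstep.2⟩

-- B-side: the canonical sum over the mask's bits -------------------------------

def Cmask (requirements resources : List Int) (n M : Nat) : Int :=
  ∑ p ∈ Finset.range n,
    (if M.testBit p && condb requirements resources (n - 1 - p) then ((2 ^ p : Nat) : Int) else 0)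

lemma Cmask_zero (requirements resources : List Int) (n : Nat) :
    Cmask requirements resources n 0 = 0 := by
  simp [Cmask, Nat.zero_testBit]

lemma Cmask_sub (requirements resources : List Int) (n M t : Nat) (ht : t < n)
    (hbit : M.testBit t = true) :
    Cmask requirements resources n M
      = Cmask requirements resources n (M - 2 ^ t)
        + (if condb requirements resources (n - 1 - t) then ((2 ^ t : Nat) : Int) else 0) := by
  unfold Cmask
  have htm : t ∈ Finset.range n := Finset.mem_range.mpr ht
  rw [← Finset.add_sum_erase _ _ htm, ← Finset.add_sum_erase _ _ htm]
  have hsum : ∀ p ∈ (Finset.range n).erase t,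
      (if M.testBit p && condb requirements resources (n - 1 - p) then ((2 ^ p : Nat) : Int) else 0)
        = (if (M - 2 ^ t).testBit p && condb requirements resources (n - 1 - p) then ((2 ^ p : Nat) : Int) else 0) := by
    intro p hp
    rw [nat_testBit_sub_pow M t p hbit (Finset.mem_erase.mp hp).1]
  rw [Finset.sum_congr rfl hsum, hbit, nat_testBit_sub_pow_self M t hbit]
  simp only [Bool.true_and, Bool.false_and, Bool.false_eq_true, if_false]
  ring

-- B's loop computes the canonical sum
lemma loopB_spec (requirements resources : List Int) (n : Nat) :
    ∀ M : Nat, M < 2 ^ n → ∀ r f,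
      loopB requirements resources (n : Int) (M : Int) r f
        = (r + 2 * Cmask requirements resources n M, f - Cmask requirements resources n M) := by
  intro M
  induction M using Nat.strong_induction_on with
  | _ M ih =>
    intro hM r f
    by_cases hM0 : M = 0
    · subst hM0
      rw [loopB, dif_neg (by norm_num), Cmask_zero]
      norm_num
    · have hposN : 0 < M := Nat.pos_of_ne_zero hM0
      have hpos : (0:Int) < (M : Int) := by exact_mod_cast hposN
      obtain ⟨t, hland, hle, hbit, hlow⟩ := lowN_spec M hposN
      have hlowv : PySem.Int.band (M : Int) (-(M : Int)) = ((2 ^ t : Nat) : Int) := by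
        rw [band_pos_neg_self M hposN, hland,
            Nat.sub_sub_self hle]
      have htn : t < n := by
        by_contra hc
        push_neg at hc
        have h1 : 2 ^ n ≤ 2 ^ t := Nat.pow_le_pow_right (by omega) hc
        omega
      have hMM : (M : Int) - ((2 ^ t : Nat) : Int) = ((M - 2 ^ t : Nat) : Int) := by
        push_cast [hle]; ring
      have hdecM : M - 2 ^ t < M := by
        have := Nat.two_pow_pos t
        omega
      have hidx : (n : Int) - 1 - ((PySem.Int.bitLength ((2 ^ t : Nat) : Int) - 1 : Nat) : Int)
          = ((n - 1 - t : Nat) : Int) := by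
        rw [bitLength_two_pow]
        omega
      rw [loopB, dif_pos hpos]
      simp only [hlowv, hidx, hMM]
      by_cases hc : condb requirements resources (n - 1 - t) = true
      · have hc' : PySem.List.pyGetD resources ((n - 1 - t : Nat) : Int) 0
            ≥ PySem.List.pyGetD requirements ((n - 1 - t : Nat) : Int) 0 := by
          simpa [condb] using hc
        rw [if_pos hc', ih (M - 2 ^ t) hdecM (by omega) _ _,
            Cmask_sub requirements resources n M t htn hbit, if_pos hc]
        rw [Prod.mk.injEq]
        constructor <;> ring
      · have hc' : ¬ PySem.List.pyGetD resources ((n - 1 - t : Nat) : Int) 0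
            ≥ PySem.List.pyGetD requirements ((n - 1 - t : Nat) : Int) 0 := by
          simpa [condb] using hc
        rw [if_neg hc', ih (M - 2 ^ t) hdecM (by omega) _ _,
            Cmask_sub requirements resources n M t htn hbit, if_neg hc]
        rw [Prod.mk.injEq]
        constructor <;> ring

-- A's csum, as a sum, equals the canonical sum over the mask -------------------

lemma csum_eq_sum (requirements resources : List Int) (FL : Int) (k : Nat) :
    csum requirements resources FL k
      = ∑ i ∈ Finset.range k,
          (if hitb requirements resources FL i then ((2 ^ (requirements.length - 1 - i) : Nat) : Int) else 0) := by
  induction k with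
  | zero => simp [csum]
  | succ k ih =>
    rw [csum_succ, Finset.sum_range_succ, ← ih]
    by_cases h : hitb requirements resources FL k = true
    · rw [if_pos h, if_pos h]
    · rw [if_neg h, if_neg h]
      ring

lemma csum_eq_Cmask (requirements resources : List Int) (FLAGS : Int) (M : Nat)
    (hM : ∀ p, p < requirements.length → M.testBit p = FLAGS.testBit p) :
    csum requirements resources FLAGS requirements.length
      = Cmask requirements resources requirements.length M := by
  rw [csum_eq_sum]
  have hstep : ∀ i ∈ Finset.range requirements.length,
      (if hitb requirements resources FLAGS i then ((2 ^ (requirements.length - 1 - i) : Nat) : Int) else 0)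
        = (fun p => if M.testBit p && condb requirements resources (requirements.length - 1 - p)
              then ((2 ^ p : Nat) : Int) else 0) (requirements.length - 1 - i) := by
    intro i hi
    have hi' : i < requirements.length := Finset.mem_range.mp hi
    have hii : requirements.length - 1 - (requirements.length - 1 - i) = i := by omega
    have hlt : requirements.length - 1 - i < requirements.length := by omega
    simp only [hitb, hii, hM _ hlt]
    rfl
  rw [Finset.sum_congr rfl hstep,
      Finset.sum_range_reflect
        (fun p => if M.testBit p && condb requirements resources (requirements.length - 1 - p)
          then ((2 ^ p : Nat) : Int) else 0) requirements.length]
  rfl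

-- ===== VERDICT (by name: the statement is the Claim_ definition above) =====
theorem reward_bin_spec : Claim_equal_reward_bin := by
  intro requirements resources FLAGS action _ _
  show reward_bin requirements resources FLAGS action = reward_bin_alt requirements resources FLAGS action
  simp only [reward_bin, reward_bin_alt]
  rw [PySem.List.pyRange_zero_natCast, List.foldl_map]
  rw [(foldA_inv requirements resources FLAGS requirements.length (le_refl _)).1]
  obtain ⟨M, hMeq, hMlt, hMbit⟩ := mask_spec FLAGS requirements.length
  rw [show ((requirements.length : Int)).toNat = requirements.length from Int.toNat_natCast _,
      hMeq, loopB_spec requirements resources requirements.length M hMlt,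
      ← csum_eq_Cmask requirements resources FLAGS M hMbit]
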